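-- pv_equiv track=rewrite | github.com/Fondamenti18/fondamenti-di-programmazione | students/1802989/homework02/program02.py | search
-- ===== SOURCE A (Python) =====
-- def search(insi, diz):
--     "Cerca all'interno del dizionario ogni elemento dell'insieme"
--     risultato = {}
--     for el in insi:
--         if el in diz:
--             lista = list()
--             lista = research(el, lista, diz)
--             risultato [el] = lista
--     return risultato
--
-- def research(chiave, lista, diz):
--     'Funzione che cerca in maniera "ricorsiva" chiavi-valori'
--     while diz[chiave]:
--         lista.append(diz[chiave])
--         chiave = diz[chiave]
--     return lista[::-1]
-- ===== SOURCE B (Python) =====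
-- def search(insi, diz):
--     "Cerca all'interno del dizionario ogni elemento dell'insieme"
--     memo = {}
--     risultato = {}
--     for el in insi:
--         if el in diz:
--             risultato[el] = _chain(el, diz, memo)
--     return risultato
--
-- def _chain(start, diz, memo):
--     'Follow the chain with an explicit stack, then unwind it building each result back-to-front; memo shares work between elements.'
--     stack = []
--     chiave = start
--     while chiave not in memo:
--         val = diz[chiave]
--         if not val:
--             memo[chiave] = []
--             break
--         stack.append(chiave)
--         chiave = val
--     while stack:
--         k = stack.pop()
--         v = diz[k]
--         memo[k] = memo[v] + [v]
--     return memo[start]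
-- ===== Notes on version B (the rewrite author's own statement) =====
-- stated objective: alternative
-- what changed: A follows each chain with a while-loop appending values and reversing at the end; B pushes the chain's keys on an explicit stack and unwinds it building each result back-to-front, memoizing every key's result in a dictionary shared across the queried elements so overlapping chains are traversed once.
import Mathlib
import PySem

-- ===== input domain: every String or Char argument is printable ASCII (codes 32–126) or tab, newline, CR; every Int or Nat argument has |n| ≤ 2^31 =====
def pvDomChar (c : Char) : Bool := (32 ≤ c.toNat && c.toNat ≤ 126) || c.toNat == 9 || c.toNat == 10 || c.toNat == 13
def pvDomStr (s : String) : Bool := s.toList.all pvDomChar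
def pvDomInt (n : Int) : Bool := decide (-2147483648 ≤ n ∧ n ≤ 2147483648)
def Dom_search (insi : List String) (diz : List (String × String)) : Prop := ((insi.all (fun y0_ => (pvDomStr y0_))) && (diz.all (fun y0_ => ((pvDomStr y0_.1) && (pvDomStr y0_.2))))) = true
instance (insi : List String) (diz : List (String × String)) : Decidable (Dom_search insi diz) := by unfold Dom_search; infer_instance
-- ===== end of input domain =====

-- B replaces A's per-element while-loop+reverse by an explicit push/unwind stack that builds each
-- chain back-to-front and a memo dictionary shared across the queried elements (objective: alternative).

-- ===== PORT A =====
-- A's `while diz[chiave]:` loop; fuel diz.length+1 covers every terminating run (a terminating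
-- chain visits pairwise distinct keys, see Pre_search); dict lookup = first match on the assoc list.
def researchLoop (diz : List (String × String)) : Nat → String → List String → List String
  | 0, _, lista => lista
  | n + 1, chiave, lista =>
    match List.lookup chiave diz with
    | none => lista                               -- KeyError in Python: outside Pre_search
    | some v => if v = "" then lista else researchLoop diz n v (lista ++ [v])

-- research(chiave, lista, diz); lista[::-1] is List.reverse (PySem.List.slice?_none_none_neg_one)
def research (chiave : String) (lista : List String) (diz : List (String × String)) : List String :=
  (researchLoop diz (diz.length + 1) chiave lista).reverse

def search (insi : List String) (diz : List (String × String)) : List (String × List String) :=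
  (insi.foldl
    (fun risultato el =>
      if (List.lookup el diz).isSome then risultato.insert el (research el [] diz) else risultato)
    (PySem.Dict.empty : PySem.Dict String (List String))).items

-- ===== PORT B =====
-- first loop of _chain: push the chain's keys until a memo hit, a falsy value, or (outside
-- Pre_search) a missing key; same fuel bound as A's loop
def phase1 (diz : List (String × String)) :
    Nat → String → List String → PySem.Dict String (List String) →
    List String × PySem.Dict String (List String)
  | 0, _, stack, memo => (stack, memo)
  | n + 1, chiave, stack, memo =>
    if (memo.get? chiave).isSome then (stack, memo)
    else
      match List.lookup chiave diz with
      | none => (stack, memo)                     -- KeyError in Python: outside Pre_search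
      | some v =>
        if v = "" then (stack, memo.insert chiave [])
        else phase1 diz n v (stack ++ [chiave]) memo

-- second loop of _chain: `while stack: k = stack.pop(); memo[k] = memo[v] + [v]` — pops from the
-- end, so it consumes the reversed stack
def unwindGo (diz : List (String × String)) :
    List String → PySem.Dict String (List String) → PySem.Dict String (List String)
  | [], memo => memo
  | k :: ks, memo =>
    let v := (List.lookup k diz).getD ""          -- lookup succeeds for every stacked key
    unwindGo diz ks (memo.insert k (((memo.get? v).getD []) ++ [v]))

def chainB (start : String) (diz : List (String × String))
    (memo : PySem.Dict String (List String)) :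
    List String × PySem.Dict String (List String) :=
  let p := phase1 diz (diz.length + 1) start [] memo
  let m2 := unwindGo diz p.1.reverse p.2
  ((m2.get? start).getD [], m2)

def search_alt (insi : List String) (diz : List (String × String)) : List (String × List String) :=
  (insi.foldl
    (fun st el =>
      if (List.lookup el diz).isSome then
        let r := chainB el diz st.2
        (st.1.insert el r.1, r.2)
      else st)
    ((PySem.Dict.empty : PySem.Dict String (List String)),
     (PySem.Dict.empty : PySem.Dict String (List String)))).1.items

-- ===== PRECONDITION & SPEC =====
-- okChain n k is a property of the key→value graph of diz, not of either port (neither port uses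
-- it): the path from k along the dictionary's edges reaches a falsy ("") value within n hops, every
-- visited vertex being a key of diz.
def okChain (diz : List (String × String)) : Nat → String → Bool
  | 0, _ => false
  | n + 1, k =>
    match List.lookup k diz with
    | none => false
    | some v => v = "" || okChain diz n v

-- Pre_search holds exactly when Python's A returns: for each queried element that is a key, the
-- chain ends in "" without a missing key (a terminating chain visits pairwise distinct keys, so
-- diz.length+1 lookups suffice); otherwise A raises KeyError or loops forever on a cycle.
def Pre_search (insi : List String) (diz : List (String × String)) : Prop :=
  ∀ el ∈ insi, (List.lookup el diz).isSome → okChain diz (diz.length + 1) el = true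

instance (insi : List String) (diz : List (String × String)) : Decidable (Pre_search insi diz) := by
  unfold Pre_search; infer_instance

def pvWitness_search : List String × (List (String × String)) :=
  (["a", "x"], [("a", "b"), ("b", "")])

def Spec_search (insi : List String) (diz : List (String × String)) (out : List (String × List String)) : Prop := out = search_alt insi diz
instance (insi : List String) (diz : List (String × String)) (out : List (String × List String)) : Decidable (Spec_search insi diz out) := by unfold Spec_search; infer_instance

-- ===== CLAIM (what is proved, stated in full; the proofs are below) =====
def Claim_equal_search : Prop := ∀ (insi : List String) (diz : List (String × String)), Dom_search insi diz → Pre_search insi diz → Spec_search insi diz (search insi diz)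

-- ===== LEMMAS AND PROOFS =====

-- res diz k: the value A's research computes for key k (fuel diz.length+1, empty accumulator)
def res (diz : List (String × String)) (k : String) : List String :=
  (researchLoop diz (diz.length + 1) k []).reverse

theorem okChain_succ (diz : List (String × String)) (n : Nat) (k : String) :
    okChain diz (n + 1) k =
      (match List.lookup k diz with
       | none => false
       | some v => (decide (v = "") || okChain diz n v)) := rfl

theorem researchLoop_succ (diz : List (String × String)) (n : Nat) (chiave : String)
    (lista : List String) :
    researchLoop diz (n + 1) chiave lista =
      (match List.lookup chiave diz with
       | none => lista
       | some v => if v = "" then lista else researchLoop diz n v (lista ++ [v])) := rfl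

theorem phase1_succ (diz : List (String × String)) (n : Nat) (chiave : String)
    (stack : List String) (memo : PySem.Dict String (List String)) :
    phase1 diz (n + 1) chiave stack memo =
      (if (memo.get? chiave).isSome then (stack, memo)
       else
        match List.lookup chiave diz with
        | none => (stack, memo)
        | some v =>
          if v = "" then (stack, memo.insert chiave [])
          else phase1 diz n v (stack ++ [chiave]) memo) := rfl

theorem okChain_mono (diz : List (String × String)) :
    ∀ n k, okChain diz n k = true → okChain diz (n + 1) k = true := by
  intro n
  induction n with
  | zero => intro k h; simp [okChain] at h
  | succ m ih =>
    intro k h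
    rw [okChain_succ] at h ⊢
    cases hl : List.lookup k diz with
    | none => rw [hl] at h; simp at h
    | some v =>
      rw [hl] at h
      show (decide (v = "") || okChain diz (m + 1) v) = true
      have h' : (decide (v = "") || okChain diz m v) = true := h
      simp only [Bool.or_eq_true] at h' ⊢
      rcases h' with h' | h'
      · exact Or.inl h'
      · exact Or.inr (ih v h')

theorem okChain_next {diz : List (String × String)} {k v : String} {n : Nat}
    (hl : List.lookup k diz = some v) (hv : v ≠ "")
    (hok : okChain diz (n + 1) k = true) : okChain diz n v = true := by
  rw [okChain_succ, hl] at hok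
  have hok' : (decide (v = "") || okChain diz n v) = true := hok
  simp only [Bool.or_eq_true, decide_eq_true_eq] at hok'
  rcases hok' with h | h
  · exact absurd h hv
  · exact h

theorem researchLoop_stable (diz : List (String × String)) :
    ∀ n k lista, okChain diz n k = true →
      researchLoop diz (n + 1) k lista = researchLoop diz n k lista := by
  intro n
  induction n with
  | zero => intro k lista h; simp [okChain] at h
  | succ m ih =>
    intro k lista h
    rw [okChain_succ] at h
    cases hl : List.lookup k diz with
    | none => rw [hl] at h; simp at h
    | some v =>
      rw [hl] at h
      have h2 : (decide (v = "") || okChain diz m v) = true := h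
      clear h
      simp only [Bool.or_eq_true, decide_eq_true_eq] at h2
      by_cases hv : v = ""
      · rw [researchLoop_succ, researchLoop_succ, hl]
        simp [hv]
      · rw [researchLoop_succ diz (m + 1), researchLoop_succ diz m, hl]
        simp only [if_neg hv]
        rcases h2 with h2 | h2
        · exact absurd h2 hv
        · exact ih v (lista ++ [v]) h2

theorem researchLoop_acc (diz : List (String × String)) :
    ∀ n k lista, researchLoop diz n k lista = lista ++ researchLoop diz n k [] := by
  intro n
  induction n with
  | zero => intro k lista; simp [researchLoop]
  | succ m ih =>
    intro k lista
    rw [researchLoop_succ, researchLoop_succ]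
    cases hl : List.lookup k diz with
    | none => simp
    | some v =>
      by_cases hv : v = ""
      · simp [hv]
      · simp only [if_neg hv]
        rw [ih v (lista ++ [v]), ih v ([] ++ [v])]
        simp

theorem res_base {diz : List (String × String)} {k : String}
    (h : List.lookup k diz = some "") : res diz k = [] := by
  unfold res
  rw [researchLoop_succ, h]
  simp

theorem res_step {diz : List (String × String)} {k v : String}
    (hl : List.lookup k diz = some v) (hv : v ≠ "")
    (hokv : okChain diz diz.length v = true) :
    res diz k = res diz v ++ [v] := by
  unfold res
  rw [researchLoop_succ, hl]
  simp only [if_neg hv]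
  rw [researchLoop_acc diz diz.length v ([] ++ [v]),
    researchLoop_stable diz diz.length v [] hokv]
  simp

-- memo invariant: every entry is a terminating key mapped to its A-result
def MemoInv (diz : List (String × String)) (memo : PySem.Dict String (List String)) : Prop :=
  ∀ k l, memo.get? k = some l →
    okChain diz (diz.length + 1) k = true ∧ l = res diz k

theorem memoInv_insert {diz : List (String × String)}
    {memo : PySem.Dict String (List String)} {k : String}
    (hinv : MemoInv diz memo) (hok : okChain diz (diz.length + 1) k = true) :
    MemoInv diz (memo.insert k (res diz k)) := by
  intro k' l h
  rw [PySem.Dict.get?_insert] at h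
  by_cases he : k' = k
  · subst he
    rw [if_pos rfl] at h
    injection h with h'
    exact ⟨hok, h'.symm⟩
  · rw [if_neg he] at h
    exact hinv k' l h

theorem phase1_acc (diz : List (String × String)) :
    ∀ f k stack memo, phase1 diz f k stack memo =
      (stack ++ (phase1 diz f k [] memo).1, (phase1 diz f k [] memo).2) := by
  intro f
  induction f with
  | zero => intro k stack memo; simp [phase1]
  | succ n ih =>
    intro k stack memo
    rw [phase1_succ, phase1_succ diz n k []]
    by_cases hm : (memo.get? k).isSome
    · simp [hm]
    · simp only [if_neg hm]
      cases hl : List.lookup k diz with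
      | none => simp
      | some v =>
        by_cases hv : v = ""
        · simp [hv]
        · simp only [if_neg hv]
          rw [ih v (stack ++ [k]) memo, ih v ([] ++ [k]) memo]
          simp

theorem unwindGo_append (diz : List (String × String)) :
    ∀ a b memo, unwindGo diz (a ++ b) memo = unwindGo diz b (unwindGo diz a memo) := by
  intro a
  induction a with
  | nil => intro b memo; rfl
  | cons k ks ih => intro b memo; simp only [List.cons_append, unwindGo]; exact ih b _

-- the heart of the proof: one chainB-style phase1+unwind run extends a sound memo with the
-- queried key bound to A's result
theorem main_lemma (diz : List (String × String)) :
    ∀ n f k memo, n ≤ f → okChain diz n k = true →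
      okChain diz (diz.length + 1) k = true → MemoInv diz memo →
      MemoInv diz (unwindGo diz (phase1 diz f k [] memo).1.reverse (phase1 diz f k [] memo).2) ∧
      (unwindGo diz (phase1 diz f k [] memo).1.reverse (phase1 diz f k [] memo).2).get? k
        = some (res diz k) := by
  intro n
  induction n with
  | zero => intro f k memo _ h; simp [okChain] at h
  | succ m ih =>
    intro f k memo hnf hok hokN hinv
    cases f with
    | zero => omega
    | succ f' =>
      rw [phase1_succ]
      by_cases hm : (memo.get? k).isSome
      · simp only [if_pos hm]
        obtain ⟨l, hl⟩ := Option.isSome_iff_exists.mp hm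
        have := hinv k l hl
        simp only [List.reverse_nil, unwindGo]
        exact ⟨hinv, by rw [hl, this.2]⟩
      · simp only [if_neg hm]
        cases hl : List.lookup k diz with
        | none =>
          rw [okChain_succ, hl] at hok
          simp at hok
        | some v =>
          by_cases hv : v = ""
          · simp only [if_pos hv]
            have hres : res diz k = [] := res_base (hv ▸ hl)
            simp only [List.reverse_nil, unwindGo]
            constructor
            · have := memoInv_insert hinv hokN
              rw [hres] at this
              exact this
            · rw [PySem.Dict.get?_insert, if_pos rfl, hres]
          · simp only [if_neg hv]
            have hokv : okChain diz m v = true := okChain_next hl hv hok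
            have hokvL : okChain diz diz.length v = true := okChain_next hl hv hokN
            have hokvN : okChain diz (diz.length + 1) v = true := okChain_mono diz _ v hokvL
            have hres : res diz k = res diz v ++ [v] := res_step hl hv hokvL
            rw [phase1_acc diz f' v ([] ++ [k]) memo]
            simp only [List.nil_append, List.cons_append, List.nil_append]
            have hstep := ih f' v memo (Nat.succ_le_succ_iff.mp hnf) hokv hokvN hinv
            set p := phase1 diz f' v [] memo with hp
            have hrev : (k :: p.1).reverse = p.1.reverse ++ [k] := by simp
            rw [hrev, unwindGo_append]
            set M := unwindGo diz p.1.reverse p.2 with hM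
            have hMinv : MemoInv diz M := hstep.1
            have hMv : M.get? v = some (res diz v) := hstep.2
            simp only [unwindGo, hl, Option.getD_some, hMv]
            constructor
            · have := memoInv_insert hMinv hokN
              rw [hres] at this
              simpa using this
            · rw [PySem.Dict.get?_insert, if_pos rfl, hres]

theorem top_lemma (diz : List (String × String)) :
    ∀ (insi : List String) (ris memo : PySem.Dict String (List String)),
      (∀ el ∈ insi, (List.lookup el diz).isSome → okChain diz (diz.length + 1) el = true) →
      MemoInv diz memo →
      insi.foldl
        (fun risultato el =>
          if (List.lookup el diz).isSome then risultato.insert el (research el [] diz)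
          else risultato) ris
      = (insi.foldl
          (fun st el =>
            if (List.lookup el diz).isSome then
              let r := chainB el diz st.2
              (st.1.insert el r.1, r.2)
            else st) (ris, memo)).1 := by
  intro insi
  induction insi with
  | nil => intro ris memo _ _; rfl
  | cons el rest ih =>
    intro ris memo hpre hinv
    simp only [List.foldl_cons]
    by_cases hs : (List.lookup el diz).isSome
    · simp only [if_pos hs]
      have hok : okChain diz (diz.length + 1) el = true :=
        hpre el (List.mem_cons_self ..) hs
      have hmain := main_lemma diz (diz.length + 1) (diz.length + 1) el memo
        (Nat.le_refl _) hok hok hinv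
      have hval : (chainB el diz memo).1 = res diz el := by
        simp only [chainB]
        rw [hmain.2]
        rfl
      have hmemo : MemoInv diz (chainB el diz memo).2 := hmain.1
      have hres : research el [] diz = res diz el := rfl
      rw [hres, hval]
      exact ih (ris.insert el (res diz el)) (chainB el diz memo).2
        (fun e he h => hpre e (List.mem_cons_of_mem _ he) h) hmemo
    · simp only [if_neg hs]
      exact ih ris memo (fun e he h => hpre e (List.mem_cons_of_mem _ he) h) hinv

-- ===== VERDICT (by name: the statement is the Claim_ definition above) =====
theorem search_spec : Claim_equal_search := by
  intro insi diz _ hpre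
  unfold Spec_search search search_alt
  have hinv : MemoInv diz PySem.Dict.empty := by
    intro k l h
    rw [PySem.Dict.get?_empty] at h
    cases h
  rw [top_lemma diz insi PySem.Dict.empty PySem.Dict.empty hpre hinv]
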